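-- pv_equiv track=rewrite | github.com/tachyon83/code-rhino | DAY1~99/DAY06-BOJ2660-회장뽑기/shinjam.py | bfs
-- ===== SOURCE A (Python) =====
-- from collections import defaultdict, deque
--
-- def bfs(graph, root, visited):
--     queue = deque([(root, 0)])
--     ret = 0
--     while queue:
--         node, depth = queue.popleft()
--         if not visited[node]:
--             visited[node] = 1
--             if ret < depth:
--                 ret = depth
--             queue.extend([(n, depth + 1) for n in graph[node] if not visited[n]])
--     return ret
-- ===== SOURCE B (Python) =====
-- # Round-based reachability saturation instead of a BFS queue: no deque, no frontier
-- # list and no per-node depths -- each round recomputes the whole unvisited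
-- # neighbourhood of the reached SET against the original `visited`, and the answer is
-- # the number of growing rounds.  Mutates `visited` to the same final state as A.
-- def bfs(graph, root, visited):
--     if visited[root]:
--         return 0
--     reach = {root}
--     ret = 0
--     while True:
--         new = {v for u in reach for v in graph[u] if not visited[v]} - reach
--         if not new:
--             break
--         reach |= new
--         ret += 1
--     for u in reach:
--         visited[u] = 1
--     return ret
-- ===== Notes on version B (the rewrite author's own statement) =====
-- stated objective: alternative
-- what changed: Replaces A's deque-of-(node,depth) BFS with round-based reachability saturation: each round recomputes the unvisited neighbourhood of the whole reached set against the original visited list and the answer is the number of growing rounds; no queue, no frontier, no per-node depths.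
-- outside the precondition, e.g. on bfs({0: [-2], -2: []}, 0, [0, 0]): A returns 0, B returns 1
import Mathlib
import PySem

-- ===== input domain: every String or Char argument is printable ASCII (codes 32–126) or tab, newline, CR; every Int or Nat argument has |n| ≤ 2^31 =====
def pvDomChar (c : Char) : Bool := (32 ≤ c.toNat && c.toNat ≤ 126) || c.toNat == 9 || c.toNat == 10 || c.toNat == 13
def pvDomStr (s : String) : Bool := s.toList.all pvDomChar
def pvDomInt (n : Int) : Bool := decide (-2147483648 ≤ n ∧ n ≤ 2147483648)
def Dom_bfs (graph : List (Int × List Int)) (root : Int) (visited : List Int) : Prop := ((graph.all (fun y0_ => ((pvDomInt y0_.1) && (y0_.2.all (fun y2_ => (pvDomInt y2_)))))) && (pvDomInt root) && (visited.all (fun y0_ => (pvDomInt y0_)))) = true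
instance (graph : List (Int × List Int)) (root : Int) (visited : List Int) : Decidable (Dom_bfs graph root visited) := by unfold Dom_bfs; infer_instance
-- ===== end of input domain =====

-- B replaces A's deque BFS by round-based reachability saturation (no queue, no per-node
-- depths; the answer is the number of growing rounds); in Python both mutate `visited` to
-- the same final state on Pre_, the equivalence proved here is about the return value.

-- Termination helper for port A: marking an unvisited slot strictly decreases the
-- number of 0-entries of `visited`.
theorem pv_count_set_lt (xs : List Int) (k : Nat) (h : xs[k]? = some 0) :
    (xs.set k 1).count 0 < xs.count 0 := by
  have hk : k < xs.length := by simpa using (List.getElem?_eq_some_iff.mp h).1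
  have hv : xs[k] = 0 := by simpa [List.getElem?_eq_getElem hk] using h
  rw [List.count_set hk]
  simp [hv]
  exact hv ▸ List.getElem_mem hk

theorem pv_pySetD_count_lt (xs : List Int) (i : Int) (h : PySem.List.pyGet? xs i = some 0) :
    (PySem.List.pySetD xs i 1).count 0 < xs.count 0 := by
  unfold PySem.List.pyGet? at h
  cases hidx : PySem.List.pyIdx? xs.length i with
  | none => rw [hidx] at h; simp at h
  | some k =>
    rw [hidx] at h; simp at h
    have heq : PySem.List.pySetD xs i 1 = xs.set k 1 := by
      unfold PySem.List.pySetD PySem.List.pySet?; rw [hidx]; rfl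
    rw [heq]; exact pv_count_set_lt xs k h

-- ===== PORT A =====
-- A's while-loop over the deque of (node, depth) pairs.  Where Python raises
-- (visited[...] IndexError, graph[...] KeyError — excluded by Pre_) the port
-- returns the current ret.
def bfsLoopA (graph : List (Int × List Int)) (queue : List (Int × Int))
    (visited : List Int) (ret : Int) : Int :=
  match queue with
  | [] => ret
  | (node, depth) :: rest =>
    match hg : PySem.List.pyGet? visited node with
    | none => ret  -- Python: IndexError, outside Pre_
    | some v =>
      if hv : v = 0 then
        let visited' := PySem.List.pySetD visited node 1
        let ret' := if ret < depth then depth else ret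
        match (PySem.Dict.ofList graph).get? node with
        | none => ret'  -- Python: KeyError, outside Pre_
        | some nbrs =>
          bfsLoopA graph
            (rest ++ (nbrs.filter (fun n => PySem.List.pyGet? visited' n == some 0)).map
              (fun n => (n, depth + 1))) visited' ret'
      else bfsLoopA graph rest visited ret
termination_by (visited.count 0, queue.length)
decreasing_by
  · exact Prod.Lex.left _ _ (by subst hv; exact pv_pySetD_count_lt visited node hg)
  · exact Prod.Lex.right _ (by simp)

def bfs (graph : List (Int × List Int)) (root : Int) (visited : List Int) : Int :=
  bfsLoopA graph [(root, 0)] visited 0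

-- ===== PORT B =====
-- One saturation round: {v for u in reach for v in graph[u] if not visited[v]} - reach.
-- none transliterates Python's KeyError on graph[u] (outside Pre_); the filter keeps a
-- neighbour iff visited[v] == 0 (where Python would raise IndexError — pyGet? = none —
-- it keeps nothing; such inputs are outside Pre_).
def satNew (graph : List (Int × List Int)) (visited : List Int)
    (reach : PySem.Set Int) : Option (PySem.Set Int) :=
  match reach.mapM (fun u => (PySem.Dict.ofList graph).get? u) with
  | none => none
  | some lss =>
    some (PySem.Set.diff
      (PySem.Set.ofList (lss.flatMap (fun ls =>
        ls.filter (fun v => PySem.List.pyGet? visited v == some 0))))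
      reach)

-- Termination helpers for port B's while-True loop: every new node comes from some
-- adjacency list of graph and lies outside reach, so the unreached part of the
-- node universe strictly shrinks.
theorem pv_mapM_some_mem {α β : Type} (f : α → Option β) (l : List α) (ws : List β)
    (h : l.mapM f = some ws) (b : β) (hb : b ∈ ws) : ∃ a ∈ l, f a = some b := by
  induction l generalizing ws with
  | nil =>
    simp only [List.mapM_nil, Option.pure_def, Option.some.injEq] at h
    subst h; cases hb
  | cons a rest ih =>
    rw [List.mapM_cons] at h
    cases hfa : f a with
    | none => rw [hfa] at h; simp at h
    | some b0 =>
      rw [hfa] at h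
      cases hrest : rest.mapM f with
      | none => rw [hrest] at h; simp at h
      | some ws' =>
        rw [hrest] at h
        simp at h
        subst h
        rcases List.mem_cons.mp hb with rfl | hb'
        · exact ⟨a, List.mem_cons_self, hfa⟩
        · obtain ⟨a', ha', hfa'⟩ := ih ws' hrest hb'
          exact ⟨a', List.mem_cons_of_mem _ ha', hfa'⟩

theorem pv_mem_items_ofList {κ ν : Type} [BEq κ] [LawfulBEq κ] (l : List (κ × ν))
    (p : κ × ν) (h : p ∈ (PySem.Dict.ofList l).items) : p ∈ l := by
  induction l using List.reverseRecOn with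
  | nil => simpa [PySem.Dict.ofList, PySem.Dict.update, PySem.Dict.empty] using h
  | append_singleton l x ih =>
    have he : PySem.Dict.ofList (l ++ [x]) = (PySem.Dict.ofList l).insert x.1 x.2 := by
      simp [PySem.Dict.ofList, PySem.Dict.update, List.foldl_append]
    rw [he] at h
    rcases (PySem.Dict.mem_items_insert _ _ _ _).mp h with h1 | h2
    · subst h1; simp
    · exact List.mem_append_left _ (ih h2.1)

theorem pv_get?_sub (graph : List (Int × List Int)) (u : Int) (ls : List Int)
    (h : (PySem.Dict.ofList graph).get? u = some ls) :
    ∀ x ∈ ls, x ∈ graph.flatMap (fun p => p.2) := by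
  intro x hx
  have hm := pv_mem_items_ofList graph (u, ls) (PySem.Dict.mem_items_of_get?_eq_some _ h)
  exact List.mem_flatMap.mpr ⟨(u, ls), hm, hx⟩

theorem pv_filter_length_le (l : List Int) (p q : Int → Bool)
    (himp : ∀ x, q x = true → p x = true) :
    (l.filter q).length ≤ (l.filter p).length := by
  induction l with
  | nil => simp
  | cons a rest ih =>
    simp only [List.filter_cons]
    cases hq : q a
    · cases hp : p a <;> simp <;> omega
    · rw [himp a hq]; simpa using ih

theorem pv_filter_length_lt (l : List Int) (p q : Int → Bool)
    (himp : ∀ x, q x = true → p x = true) (w : Int) (hw : w ∈ l)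
    (hpw : p w = true) (hqw : q w = false) :
    (l.filter q).length < (l.filter p).length := by
  induction l with
  | nil => cases hw
  | cons a rest ih =>
    simp only [List.filter_cons]
    rcases List.mem_cons.mp hw with rfl | hw'
    · rw [hqw, hpw]
      simpa using Nat.lt_succ_of_le (pv_filter_length_le rest p q himp)
    · cases hq : q a
      · cases hp : p a
        · simpa using ih hw'
        · simpa using Nat.lt_succ_of_le (Nat.le_of_lt (ih hw'))
      · rw [himp a hq]; simpa using ih hw'

theorem pv_satNew_sub (graph : List (Int × List Int)) (visited : List Int)
    (reach nw : PySem.Set Int) (h : satNew graph visited reach = some nw) :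
    ∀ w ∈ nw, w ∈ graph.flatMap (fun p => p.2) ∧ w ∉ reach := by
  intro w hw
  unfold satNew at h
  cases hm : reach.mapM (fun u => (PySem.Dict.ofList graph).get? u) with
  | none => rw [hm] at h; simp at h
  | some lss =>
    rw [hm] at h
    simp only [Option.some.injEq] at h
    subst h
    obtain ⟨hw1, hw2⟩ := (PySem.Set.mem_diff _ _ _).mp hw
    refine ⟨?_, hw2⟩
    obtain ⟨ls, hls, hwls⟩ := List.mem_flatMap.mp ((PySem.Set.mem_ofList _ _).mp hw1)
    obtain ⟨u, _, hu⟩ := pv_mapM_some_mem _ _ _ hm ls hls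
    exact pv_get?_sub graph u ls hu w (List.mem_filter.mp hwls).1

theorem pv_contains_false_iff (s : PySem.Set Int) (x : Int) :
    PySem.Set.contains s x = false ↔ x ∉ s := by
  constructor
  · intro h hc
    have := (PySem.Set.contains_iff s x).mpr hc
    rw [this] at h
    cases h
  · intro h
    cases hc : PySem.Set.contains s x
    · rfl
    · exact absurd ((PySem.Set.contains_iff _ _).mp hc) h

theorem pv_sat_measure_lt (graph : List (Int × List Int)) (reach nw : PySem.Set Int)
    (hsub : ∀ w ∈ nw, w ∈ graph.flatMap (fun p => p.2) ∧ w ∉ reach) (hne : nw ≠ []) :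
    ((PySem.List.dedup (graph.flatMap (fun p => p.2))).filter
        (fun x => !PySem.Set.contains (PySem.Set.union reach nw) x)).length <
    ((PySem.List.dedup (graph.flatMap (fun p => p.2))).filter
        (fun x => !PySem.Set.contains reach x)).length := by
  obtain ⟨w, hw⟩ := List.exists_mem_of_ne_nil nw hne
  obtain ⟨hwu, hwr⟩ := hsub w hw
  refine pv_filter_length_lt _ _ _ ?_ w ?_ ?_ ?_
  · intro x hx
    simp only [Bool.not_eq_true'] at hx ⊢
    rw [pv_contains_false_iff] at hx ⊢
    exact fun hc => hx ((PySem.Set.mem_union _ _ _).mpr (Or.inl hc))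
  · simpa [PySem.List.mem_dedup] using hwu
  · simp only [Bool.not_eq_true']
    rw [pv_contains_false_iff]; exact hwr
  · simp only [Bool.not_eq_false']
    exact (PySem.Set.contains_iff _ _).mpr ((PySem.Set.mem_union _ _ _).mpr (Or.inr hw))

-- B's while-True loop: grow reach by one saturation round per iteration, counting rounds.
def satLoop (graph : List (Int × List Int)) (visited : List Int)
    (reach : PySem.Set Int) (ret : Int) : Int :=
  match h : satNew graph visited reach with
  | none => ret  -- Python: KeyError, outside Pre_
  | some nw =>
    if hn : nw = [] then ret
    else satLoop graph visited (PySem.Set.union reach nw) (ret + 1)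
termination_by ((PySem.List.dedup (graph.flatMap (fun p => p.2))).filter
    (fun x => !PySem.Set.contains reach x)).length
decreasing_by
  exact pv_sat_measure_lt graph reach nw (pv_satNew_sub graph visited reach nw h) hn

-- The Python B's trailing `for u in reach: visited[u] = 1` loop only mutates the
-- argument (same final state as A on Pre_); it does not affect the return value.
def bfs_alt (graph : List (Int × List Int)) (root : Int) (visited : List Int) : Int :=
  match PySem.List.pyGet? visited root with
  | none => 0  -- Python: IndexError, outside Pre_
  | some v => if v = 0 then satLoop graph visited [root] 0 else 0

-- ===== PRECONDITION & SPEC =====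
-- Pre_ excludes the inputs on which Python A raises (IndexError from visited[...],
-- KeyError from graph[...]) — over-approximated: an offending node the search never
-- dequeues unvisited does not make A raise — and, in the traversal clause, inputs
-- whose referenced node ids are negative although in range: there Python's
-- negative-index wraparound lets two distinct ids share one visited slot, A's value
-- then depends on that aliasing during its in-place marking, which B's rounds over
-- the unmutated visited list do not reproduce (see claim.json cites).
def Pre_bfs (graph : List (Int × List Int)) (root : Int) (visited : List Int) : Prop :=
  ((-(visited.length : Int) ≤ root ∧ root < (visited.length : Int)) ∧
      PySem.List.pyGetD visited root 0 ≠ 0) ∨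
  ∀ n ∈ root :: graph.flatMap (fun p => p.2),
    (0 ≤ n ∧ n < (visited.length : Int)) ∧ n ∈ graph.map (fun p => p.1)
instance (graph : List (Int × List Int)) (root : Int) (visited : List Int) : Decidable (Pre_bfs graph root visited) := by unfold Pre_bfs; infer_instance

def pvWitness_bfs : (List (Int × List Int)) × Int × List Int :=
  ([(0, [1, 2]), (1, [0]), (2, [2])], 0, [0, 0, 0])

def Spec_bfs (graph : List (Int × List Int)) (root : Int) (visited : List Int) (out : Int) : Prop := out = bfs_alt graph root visited
instance (graph : List (Int × List Int)) (root : Int) (visited : List Int) (out : Int) : Decidable (Spec_bfs graph root visited out) := by unfold Spec_bfs; infer_instance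

-- ===== CLAIM (what is proved, stated in full; the proofs are below) =====
def Claim_equal_bfs : Prop := ∀ (graph : List (Int × List Int)) (root : Int) (visited : List Int), Dom_bfs graph root visited → Pre_bfs graph root visited → Spec_bfs graph root visited (bfs graph root visited)

-- ===== LEMMAS AND PROOFS =====

-- A-side intermediate form: one whole level of A's queue as a function (proof layer only).
def bfsLevel (graph : List (Int × List Int)) (frontier : List Int)
    (visited : List Int) (ret : Int) (depth : Int) : List Int × List Int × Int × Bool :=
  match frontier with
  | [] => ([], visited, ret, true)
  | node :: rest =>
    match PySem.List.pyGet? visited node with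
    | none => ([], visited, ret, false)
    | some v =>
      if v = 0 then
        let visited' := PySem.List.pySetD visited node 1
        let ret' := if ret < depth then depth else ret
        match (PySem.Dict.ofList graph).get? node with
        | none => ([], visited', ret', false)
        | some nbrs =>
          let r := bfsLevel graph rest visited' ret' depth
          ((nbrs.filter (fun n => PySem.List.pyGet? visited' n == some 0)) ++ r.1, r.2)
      else bfsLevel graph rest visited ret depth

theorem bfsLevel_inv (graph : List (Int × List Int)) (frontier : List Int)
    (visited : List Int) (ret : Int) (depth : Int) :
    (bfsLevel graph frontier visited ret depth).2.1.count 0 < visited.count 0 ∨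
      ((bfsLevel graph frontier visited ret depth).2.1 = visited ∧
        (bfsLevel graph frontier visited ret depth).1 = []) := by
  induction frontier generalizing visited ret with
  | nil => exact Or.inr ⟨rfl, rfl⟩
  | cons node rest ih =>
    cases hg : PySem.List.pyGet? visited node with
    | none => simp [bfsLevel, hg]
    | some v =>
      by_cases hv : v = 0
      · subst hv
        have hlt := pv_pySetD_count_lt visited node hg
        cases hd : (PySem.Dict.ofList graph).get? node with
        | none => simp [bfsLevel, hg, hd]; exact Or.inl hlt
        | some nbrs =>
          simp only [bfsLevel, hg, hd, if_true]
          rcases ih (PySem.List.pySetD visited node 1) (if ret < depth then depth else ret) with h | h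
          · exact Or.inl (lt_trans h hlt)
          · refine Or.inl ?_
            rw [h.1]
            exact hlt
      · simp only [bfsLevel, hg, if_neg hv]
        exact ih visited ret

-- A's queue processed level by level (proof layer only).
def bfsOuter (graph : List (Int × List Int)) (frontier : List Int)
    (visited : List Int) (ret : Int) (depth : Int) : Int :=
  if h : frontier = [] then ret
  else
    let r := bfsLevel graph frontier visited ret depth
    if r.2.2.2 then bfsOuter graph r.1 r.2.1 r.2.2.1 (depth + 1) else r.2.2.1
termination_by (visited.count 0, frontier.length)
decreasing_by
  rcases bfsLevel_inv graph frontier visited ret depth with hlt | ⟨heq, hnil⟩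
  · exact Prod.Lex.left _ _ hlt
  · rw [heq, hnil]
    exact Prod.Lex.right _ (by simp [List.length_pos_iff, h])

-- One whole level of A's queue (frontier at depth d, then ms already collected at d+1)
-- equals running bfsLevel and continuing with the combined next frontier.
theorem level_step (graph : List (Int × List Int)) (frontier : List Int)
    (ms : List Int) (visited : List Int) (ret : Int) (depth : Int) :
    bfsLoopA graph
      (frontier.map (fun n => (n, depth)) ++ ms.map (fun n => (n, depth + 1))) visited ret =
    (let r := bfsLevel graph frontier visited ret depth
     if r.2.2.2 then
       bfsLoopA graph ((ms ++ r.1).map (fun n => (n, depth + 1))) r.2.1 r.2.2.1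
     else r.2.2.1) := by
  induction frontier generalizing ms visited ret with
  | nil => simp [bfsLevel]
  | cons node rest ih =>
    rw [List.map_cons, List.cons_append, bfsLoopA]
    simp only [bfsLevel]
    cases hg : PySem.List.pyGet? visited node with
    | none => simp
    | some v =>
      by_cases hv : v = 0
      · subst hv
        cases hd : (PySem.Dict.ofList graph).get? node with
        | none => simp
        | some nbrs =>
          simp only []
          have hq :
              rest.map (fun n => (n, depth)) ++ ms.map (fun n => (n, depth + 1)) ++
                ((nbrs.filter (fun n =>
                  PySem.List.pyGet? (PySem.List.pySetD visited node 1) n == some 0)).map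
                  (fun n => (n, depth + 1))) =
              rest.map (fun n => (n, depth)) ++
                ((ms ++ nbrs.filter (fun n =>
                  PySem.List.pyGet? (PySem.List.pySetD visited node 1) n == some 0)).map
                  (fun n => (n, depth + 1))) := by
            rw [List.map_append, List.append_assoc]
          rw [hq, ih]
          simp [List.append_assoc]
      · simp only [dif_neg hv, if_neg hv]
        exact ih ms visited ret

-- A's queue started on a single level equals the level-by-level outer loop.
theorem outer_eq (graph : List (Int × List Int)) (visited : List Int)
    (frontier : List Int) (ret : Int) (depth : Int) :
    bfsLoopA graph (frontier.map (fun n => (n, depth))) visited ret =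
      bfsOuter graph frontier visited ret depth := by
  rw [bfsOuter]
  by_cases h : frontier = []
  · subst h; simp [bfsLoopA]
  · rw [dif_neg h]
    have := level_step graph frontier [] visited ret depth
    simp only [List.nil_append, List.map_nil, List.append_nil] at this
    rw [this]
    simp only []
    cases hok : (bfsLevel graph frontier visited ret depth).2.2.2 with
    | false => simp
    | true =>
      simp only [if_true]
      exact outer_eq graph (bfsLevel graph frontier visited ret depth).2.1
        (bfsLevel graph frontier visited ret depth).1
        (bfsLevel graph frontier visited ret depth).2.2.1 (depth + 1)
termination_by (visited.count 0, frontier.length)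
decreasing_by
  rcases bfsLevel_inv graph frontier visited ret depth with hlt | ⟨heq, hnil⟩
  · exact Prod.Lex.left _ _ hlt
  · rw [heq, hnil]
    exact Prod.Lex.right _ (by simp [List.length_pos_iff, h])

-- Abstractions connecting the two sides.
def pvUnv (vis0 : List Int) (x : Int) : Prop := PySem.List.pyGet? vis0 x = some 0

def pvAdj (graph : List (Int × List Int)) (u : Int) : List Int :=
  ((PySem.Dict.ofList graph).get? u).getD []

def pvGood (graph : List (Int × List Int)) (vis0 : List Int) (n : Int) : Prop :=
  0 ≤ n ∧ n < (vis0.length : Int) ∧ (PySem.Dict.ofList graph).contains n = true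

-- visited (the A-side mutable list) realises vis0 with the nodes of S marked 1.
def pvRel (vis0 visited : List Int) (S : Int → Prop) : Prop :=
  visited.length = vis0.length ∧ ∀ x : Int, 0 ≤ x →
    (S x → PySem.List.pyGet? visited x = some 1) ∧
    (¬ S x → PySem.List.pyGet? visited x = PySem.List.pyGet? vis0 x)

def pvFresh (vis0 : List Int) (S : Int → Prop) (frontier : List Int) (x : Int) : Prop :=
  x ∈ frontier ∧ ¬ S x ∧ pvUnv vis0 x

theorem pvRel_iff (vis0 visited : List Int) (S T : Int → Prop)
    (h : pvRel vis0 visited S) (hiff : ∀ x, S x ↔ T x) : pvRel vis0 visited T := by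
  refine ⟨h.1, fun x hx => ?_⟩
  obtain ⟨h1, h2⟩ := h.2 x hx
  exact ⟨fun ht => h1 ((hiff x).mpr ht), fun ht => h2 (fun hs => ht ((hiff x).mp hs))⟩

theorem pv_pyGet?_pos (vis : List Int) (x : Int) (h0 : 0 ≤ x) (hlt : x < (vis.length : Int)) :
    PySem.List.pyGet? vis x = vis[x.toNat]? := by
  unfold PySem.List.pyGet? PySem.List.pyIdx?
  rw [if_pos h0, if_pos hlt]
  rfl

theorem pv_pyGet?_none (vis : List Int) (x : Int) (h0 : 0 ≤ x) (hge : ¬ x < (vis.length : Int)) :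
    PySem.List.pyGet? vis x = none := by
  unfold PySem.List.pyGet? PySem.List.pyIdx?
  rw [if_pos h0, if_neg hge]
  rfl

theorem pv_pyGet?_isSome (vis : List Int) (x : Int) (h0 : 0 ≤ x) (hlt : x < (vis.length : Int)) :
    ∃ v, PySem.List.pyGet? vis x = some v := by
  rw [pv_pyGet?_pos vis x h0 hlt]
  have hn : x.toNat < vis.length := by omega
  exact ⟨vis[x.toNat], List.getElem?_eq_getElem hn⟩

theorem pv_pyGet?_isSome' (vis : List Int) (x : Int)
    (h1 : -(vis.length : Int) ≤ x) (h2 : x < (vis.length : Int)) :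
    ∃ v, PySem.List.pyGet? vis x = some v := by
  by_cases h0 : 0 ≤ x
  · exact pv_pyGet?_isSome vis x h0 h2
  · unfold PySem.List.pyGet? PySem.List.pyIdx?
    rw [if_neg h0, if_pos h1]
    have hn : vis.length - (-x).toNat < vis.length := by omega
    exact ⟨vis[vis.length - (-x).toNat], by simpa using List.getElem?_eq_getElem hn⟩

theorem pv_pyGet?_pySetD (vis : List Int) (u x : Int) (hu0 : 0 ≤ u)
    (hu : u < (vis.length : Int)) (hx : 0 ≤ x) :
    PySem.List.pyGet? (PySem.List.pySetD vis u 1) x =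
      if x = u then some 1 else PySem.List.pyGet? vis x := by
  rw [PySem.List.pySetD_of_nonneg vis 1 hu0]
  by_cases hxe : x = u
  · subst hxe
    rw [if_pos rfl, pv_pyGet?_pos _ x hx (by simpa using hu)]
    exact List.getElem?_set_self (by omega)
  · rw [if_neg hxe]
    by_cases hxl : x < (vis.length : Int)
    · rw [pv_pyGet?_pos _ x hx (by simpa using hxl), pv_pyGet?_pos vis x hx hxl]
      exact List.getElem?_set_ne (by omega)
    · rw [pv_pyGet?_none _ x hx (by simpa using hxl), pv_pyGet?_none vis x hx hxl]

theorem pv_contains_ofList (graph : List (Int × List Int)) (n : Int)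
    (h : n ∈ graph.map (fun p => p.1)) : (PySem.Dict.ofList graph).contains n = true := by
  induction graph using List.reverseRecOn with
  | nil => simp at h
  | append_singleton l x ih =>
    have he : PySem.Dict.ofList (l ++ [x]) = (PySem.Dict.ofList l).insert x.1 x.2 := by
      simp [PySem.Dict.ofList, PySem.Dict.update, List.foldl_append]
    rw [he, PySem.Dict.contains_insert]
    rw [List.map_append] at h
    rcases List.mem_append.mp h with h1 | h2
    · rw [ih h1]; simp
    · have : n = x.1 := by simpa using h2
      subst this; simp

theorem pv_adj_sub (graph : List (Int × List Int)) (v : Int)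
    (hc : (PySem.Dict.ofList graph).contains v = true) :
    ∀ x ∈ pvAdj graph v, x ∈ graph.flatMap (fun p => p.2) := by
  rw [PySem.Dict.contains_eq_isSome_get?] at hc
  obtain ⟨ls, hls⟩ := Option.isSome_iff_exists.mp hc
  unfold pvAdj
  rw [hls]
  exact pv_get?_sub graph v ls hls

theorem pv_mapM_get (graph : List (Int × List Int)) (reach : List Int)
    (hk : ∀ u ∈ reach, (PySem.Dict.ofList graph).contains u = true) :
    reach.mapM (fun u => (PySem.Dict.ofList graph).get? u) = some (reach.map (pvAdj graph)) := by
  induction reach with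
  | nil => rfl
  | cons u rest ih =>
    rw [List.mapM_cons]
    have hu := hk u List.mem_cons_self
    rw [PySem.Dict.contains_eq_isSome_get?] at hu
    obtain ⟨ls, hls⟩ := Option.isSome_iff_exists.mp hu
    rw [hls, ih (fun v hv => hk v (List.mem_cons_of_mem _ hv))]
    simp [pvAdj, hls]

theorem pv_mem_satNew (graph : List (Int × List Int)) (vis0 : List Int)
    (reach : PySem.Set Int)
    (hk : ∀ u ∈ reach, (PySem.Dict.ofList graph).contains u = true) :
    ∃ nw, satNew graph vis0 reach = some nw ∧
      ∀ x : Int, x ∈ nw ↔ ((∃ u ∈ reach, x ∈ pvAdj graph u) ∧ pvUnv vis0 x ∧ x ∉ reach) := by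
  unfold satNew
  rw [pv_mapM_get graph reach hk]
  refine ⟨_, rfl, fun x => ?_⟩
  rw [PySem.Set.mem_diff, PySem.Set.mem_ofList, List.mem_flatMap]
  constructor
  · rintro ⟨⟨ls, hls, hxls⟩, hxr⟩
    obtain ⟨u, hu, rfl⟩ := List.mem_map.mp hls
    obtain ⟨hx1, hx2⟩ := List.mem_filter.mp hxls
    refine ⟨⟨u, hu, hx1⟩, ?_, hxr⟩
    unfold pvUnv
    simpa using hx2
  · rintro ⟨⟨u, hu, hxu⟩, hunv, hxr⟩
    refine ⟨⟨pvAdj graph u, List.mem_map.mpr ⟨u, hu, rfl⟩, ?_⟩, hxr⟩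
    refine List.mem_filter.mpr ⟨hxu, ?_⟩
    unfold pvUnv at hunv
    simp [hunv]

-- The core level characterisation: one bfsLevel pass over `frontier`, started from a
-- list realising the marked set S, marks exactly the fresh frontier nodes, bumps ret
-- to depth iff there was a fresh node, and its next frontier's fresh part is exactly
-- the unvisited unreached neighbourhood of the fresh nodes.
theorem pv_level_char (graph : List (Int × List Int)) (vis0 : List Int)
    (HA : ∀ n ∈ graph.flatMap (fun p => p.2), pvGood graph vis0 n)
    (frontier : List Int) (visited : List Int) (ret depth : Int) (S : Int → Prop)
    (HF : ∀ u ∈ frontier, pvGood graph vis0 u)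
    (HR : pvRel vis0 visited S) :
    (bfsLevel graph frontier visited ret depth).2.2.2 = true ∧
    pvRel vis0 (bfsLevel graph frontier visited ret depth).2.1
      (fun x => S x ∨ pvFresh vis0 S frontier x) ∧
    ((∃ u, pvFresh vis0 S frontier u) →
      (bfsLevel graph frontier visited ret depth).2.2.1 = if ret < depth then depth else ret) ∧
    ((¬ ∃ u, pvFresh vis0 S frontier u) →
      (bfsLevel graph frontier visited ret depth).2.2.1 = ret ∧
      (bfsLevel graph frontier visited ret depth).1 = []) ∧
    (∀ x ∈ (bfsLevel graph frontier visited ret depth).1, x ∈ graph.flatMap (fun p => p.2)) ∧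
    (∀ x : Int,
      (x ∈ (bfsLevel graph frontier visited ret depth).1 ∧
          ¬ (S x ∨ pvFresh vis0 S frontier x) ∧ pvUnv vis0 x) ↔
      ((∃ u, pvFresh vis0 S frontier u ∧ x ∈ pvAdj graph u) ∧ pvUnv vis0 x ∧
          ¬ (S x ∨ pvFresh vis0 S frontier x))) := by
  induction frontier generalizing visited ret S with
  | nil =>
    refine ⟨rfl, pvRel_iff _ _ _ _ HR (fun x => by simp [pvFresh]), ?_, fun _ => ⟨rfl, rfl⟩, ?_, ?_⟩
    · rintro ⟨u, hu, -⟩; cases hu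
    · intro x hx; cases hx
    · intro x
      constructor
      · rintro ⟨hx, -⟩; cases hx
      · rintro ⟨⟨u, ⟨hu, -⟩, -⟩, -⟩; cases hu
  | cons u rest ih =>
    obtain ⟨hu0, hulen, hukey⟩ := HF u List.mem_cons_self
    have HFr : ∀ v ∈ rest, pvGood graph vis0 v := fun v hv => HF v (List.mem_cons_of_mem _ hv)
    have hlen := HR.1
    by_cases hSu : S u
    · -- u already marked: skipped
      have hval : PySem.List.pyGet? visited u = some 1 := (HR.2 u hu0).1 hSu
      have hskip : bfsLevel graph (u :: rest) visited ret depth =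
          bfsLevel graph rest visited ret depth := by
        simp [bfsLevel, hval]
      have hFiff : ∀ x, pvFresh vis0 S (u :: rest) x ↔ pvFresh vis0 S rest x := by
        intro x
        unfold pvFresh
        rw [List.mem_cons]
        constructor
        · rintro ⟨(rfl | hx), hnS, hun⟩
          · exact absurd hSu hnS
          · exact ⟨hx, hnS, hun⟩
        · rintro ⟨hx, hnS, hun⟩
          exact ⟨Or.inr hx, hnS, hun⟩
      rw [hskip]
      simp only [hFiff]
      exact ih visited ret S HFr HR
    · have hval : PySem.List.pyGet? visited u = PySem.List.pyGet? vis0 u := (HR.2 u hu0).2 hSu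
      obtain ⟨w, hw⟩ := pv_pyGet?_isSome vis0 u hu0 hulen
      by_cases hw0 : w = 0
      · -- u fresh: marked now
        subst hw0
        have hUu : pvUnv vis0 u := hw
        have hvval : PySem.List.pyGet? visited u = some 0 := hval.trans hw
        have hulen' : u < (visited.length : Int) := by rw [hlen]; exact hulen
        obtain ⟨nbrs, hnbrs⟩ : ∃ ls, (PySem.Dict.ofList graph).get? u = some ls := by
          have hc := hukey
          rw [PySem.Dict.contains_eq_isSome_get?] at hc
          exact Option.isSome_iff_exists.mp hc
        have hadj : pvAdj graph u = nbrs := by simp [pvAdj, hnbrs]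
        have hstep : bfsLevel graph (u :: rest) visited ret depth =
            ((nbrs.filter (fun n =>
                PySem.List.pyGet? (PySem.List.pySetD visited u 1) n == some 0)) ++
              (bfsLevel graph rest (PySem.List.pySetD visited u 1)
                (if ret < depth then depth else ret) depth).1,
             (bfsLevel graph rest (PySem.List.pySetD visited u 1)
                (if ret < depth then depth else ret) depth).2) := by
          simp [bfsLevel, hvval, hnbrs]
        have HR' : pvRel vis0 (PySem.List.pySetD visited u 1) (fun x => S x ∨ x = u) := by
          refine ⟨by rw [PySem.List.length_pySetD, hlen], fun x hx => ?_⟩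
          rw [pv_pyGet?_pySetD visited u x hu0 hulen' hx]
          constructor
          · rintro (hSx | rfl)
            · by_cases hxu : x = u
              · rw [if_pos hxu]
              · rw [if_neg hxu]; exact (HR.2 x hx).1 hSx
            · rw [if_pos rfl]
          · intro hnS
            have hxu : x ≠ u := fun h => hnS (Or.inr h)
            rw [if_neg hxu]
            exact (HR.2 x hx).2 (fun h => hnS (Or.inl h))
        obtain ⟨c1, c2, c3, c4, c5, c6⟩ :=
          ih (PySem.List.pySetD visited u 1) (if ret < depth then depth else ret)
            (fun x => S x ∨ x = u) HFr HR'
        have hfreshu : pvFresh vis0 S (u :: rest) u := ⟨List.mem_cons_self, hSu, hUu⟩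
        have hPredIff : ∀ x, ((fun x => S x ∨ x = u) x ∨ pvFresh vis0 (fun x => S x ∨ x = u) rest x)
            ↔ (S x ∨ pvFresh vis0 S (u :: rest) x) := by
          intro x
          unfold pvFresh
          rw [List.mem_cons]
          constructor
          · rintro ((hSx | rfl) | ⟨hxr, hnS', hun⟩)
            · exact Or.inl hSx
            · exact Or.inr ⟨Or.inl rfl, hSu, hUu⟩
            · exact Or.inr ⟨Or.inr hxr, fun h => hnS' (Or.inl h), hun⟩
          · rintro (hSx | ⟨(rfl | hxr), hnS, hun⟩)
            · exact Or.inl (Or.inl hSx)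
            · exact Or.inl (Or.inr rfl)
            · by_cases hxu : x = u
              · exact Or.inl (Or.inr hxu)
              · exact Or.inr ⟨hxr, by rintro (h | h) <;> [exact hnS h; exact hxu h], hun⟩
        rw [hstep]
        have hretEq : (bfsLevel graph rest (PySem.List.pySetD visited u 1)
            (if ret < depth then depth else ret) depth).2.2.1 =
            if ret < depth then depth else ret := by
          by_cases hEx : ∃ v, pvFresh vis0 (fun x => S x ∨ x = u) rest v
          · rw [c3 hEx]
            split_ifs <;> omega
          · exact (c4 hEx).1
        refine ⟨c1, ?_, fun _ => hretEq, ?_, ?_, ?_⟩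
        · exact pvRel_iff _ _ _ _ c2 hPredIff
        · intro h
          exact absurd ⟨u, hfreshu⟩ h
        · intro x hx
          rcases List.mem_append.mp hx with h1 | h2
          · exact pv_get?_sub graph u nbrs hnbrs x (List.mem_filter.mp h1).1
          · exact c5 x h2
        · intro x
          constructor
          · rintro ⟨hxm, hnp, hxu⟩
            rcases List.mem_append.mp hxm with h1 | h2
            · exact ⟨⟨u, hfreshu, by rw [hadj]; exact (List.mem_filter.mp h1).1⟩, hxu, hnp⟩
            · have hnp' : ¬ ((S x ∨ x = u) ∨ pvFresh vis0 (fun x => S x ∨ x = u) rest x) :=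
                fun h => hnp ((hPredIff x).mp h)
            
              obtain ⟨⟨v, hfv, hxadj⟩, -, -⟩ := (c6 x).mp ⟨h2, hnp', hxu⟩
              refine ⟨⟨v, ?_, hxadj⟩, hxu, hnp⟩
              exact ⟨List.mem_cons_of_mem _ hfv.1, fun h => hfv.2.1 (Or.inl h), hfv.2.2⟩
          · rintro ⟨⟨v, hfv, hxadj⟩, hxu, hnp⟩
            refine ⟨?_, hnp, hxu⟩
            have hnSx : ¬ S x := fun h => hnp (Or.inl h)
            have hxnotin : x ∉ u :: rest := fun h => hnp (Or.inr ⟨h, hnSx, hxu⟩)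
            have hxne : x ≠ u := fun h => hxnotin (h ▸ List.mem_cons_self)
            by_cases hvu : v = u
            · subst hvu
              refine List.mem_append.mpr (Or.inl (List.mem_filter.mpr ⟨by rw [← hadj]; exact hxadj, ?_⟩))
              have hx0 : 0 ≤ x := (HA x (pv_adj_sub graph v hukey x hxadj)).1
              have := (HR'.2 x hx0).2 (by rintro (h | h) <;> [exact hnSx h; exact hxne h])
              rw [this]
              unfold pvUnv at hxu
              simp [hxu]
            · have hvr : v ∈ rest := by
                rcases List.mem_cons.mp hfv.1 with h | h
                · exact absurd h hvu
                · exact h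
              have hfv' : pvFresh vis0 (fun x => S x ∨ x = u) rest v :=
                ⟨hvr, by rintro (h | h) <;> [exact hfv.2.1 h; exact hvu h], hfv.2.2⟩
              refine List.mem_append.mpr (Or.inr ?_)
              exact ((c6 x).mpr ⟨⟨v, hfv', hxadj⟩, hxu,
                fun h => hnp ((hPredIff x).mp h)⟩).1
      · -- u stale (initially visited): skipped
        have hnval : PySem.List.pyGet? visited u = some w := hval.trans hw
        have hnU : ¬ pvUnv vis0 u := by
          unfold pvUnv
          rw [hw]
          intro h
          exact hw0 (by injection h)
        have hskip : bfsLevel graph (u :: rest) visited ret depth =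
            bfsLevel graph rest visited ret depth := by
          simp [bfsLevel, hnval, hw0]
        have hFiff : ∀ x, pvFresh vis0 S (u :: rest) x ↔ pvFresh vis0 S rest x := by
          intro x
          unfold pvFresh
          rw [List.mem_cons]
          constructor
          · rintro ⟨(rfl | hx), hnS, hun⟩
            · exact absurd hun hnU
            · exact ⟨hx, hnS, hun⟩
          · rintro ⟨hx, hnS, hun⟩
            exact ⟨Or.inr hx, hnS, hun⟩
        rw [hskip]
        simp only [hFiff]
        exact ih visited ret S HFr HR

theorem pv_outer_sim (graph : List (Int × List Int)) (vis0 : List Int)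
    (HA : ∀ n ∈ graph.flatMap (fun p => p.2), pvGood graph vis0 n)
    (reach : PySem.Set Int) (frontier visited : List Int) (ret : Int)
    (hnd : reach.Nodup)
    (hg : ∀ u ∈ reach, pvGood graph vis0 u)
    (HF : ∀ u ∈ frontier, pvGood graph vis0 u)
    (HR : pvRel vis0 visited (fun x => x ∈ reach))
    (HM : ∀ x : Int, (x ∈ frontier ∧ x ∉ reach ∧ pvUnv vis0 x) ↔
        ((∃ u ∈ reach, x ∈ pvAdj graph u) ∧ pvUnv vis0 x ∧ x ∉ reach)) :
    bfsOuter graph frontier visited ret (ret + 1) = satLoop graph vis0 reach ret := by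
  obtain ⟨nw, hsat, hmem⟩ := pv_mem_satNew graph vis0 reach (fun u hu => (hg u hu).2.2)
  by_cases hnil : nw = []
  · -- saturation finished: no fresh node anywhere
    have hRHS : satLoop graph vis0 reach ret = ret := by
      rw [satLoop, hsat]
      simp [hnil]
    have hnof : ¬ ∃ u, pvFresh vis0 (fun x => x ∈ reach) frontier u := by
      rintro ⟨u, h1, h2, h3⟩
      have := (hmem u).mpr ((HM u).mp ⟨h1, h2, h3⟩)
      rw [hnil] at this
      cases this
    rw [hRHS, bfsOuter]
    by_cases hfe : frontier = []
    · rw [dif_pos hfe]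
    · rw [dif_neg hfe]
      obtain ⟨c1, c2, c3, c4, c5, c6⟩ := pv_level_char graph vis0 HA frontier visited ret
        (ret + 1) (fun x => x ∈ reach) HF HR
      obtain ⟨hret, hnxt⟩ := c4 hnof
      simp only [c1, if_true, hret, hnxt]
      rw [bfsOuter]
      simp
  · -- a growing round
    have hRHS : satLoop graph vis0 reach ret =
        satLoop graph vis0 (PySem.Set.union reach nw) (ret + 1) := by
      rw [satLoop, hsat]
      simp [hnil]
    obtain ⟨x0, hx0⟩ := List.exists_mem_of_ne_nil nw hnil
    have hfr := (HM x0).mpr ((hmem x0).mp hx0)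
    have hfe : frontier ≠ [] := fun h => by rw [h] at hfr; cases hfr.1
    obtain ⟨c1, c2, c3, c4, c5, c6⟩ := pv_level_char graph vis0 HA frontier visited ret
      (ret + 1) (fun x => x ∈ reach) HF HR
    have hFnw : ∀ x, pvFresh vis0 (fun x => x ∈ reach) frontier x ↔ x ∈ nw := by
      intro x
      constructor
      · rintro ⟨h1, h2, h3⟩
        exact (hmem x).mpr ((HM x).mp ⟨h1, h2, h3⟩)
      · intro hxnw
        have := (HM x).mpr ((hmem x).mp hxnw)
        exact ⟨this.1, this.2.1, this.2.2⟩
    have hret' : (bfsLevel graph frontier visited ret (ret + 1)).2.2.1 = ret + 1 := by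
      rw [c3 ⟨x0, hfr.1, hfr.2.1, hfr.2.2⟩, if_pos (by omega)]
    have hndU : (PySem.Set.union reach nw).Nodup := PySem.Set.nodup_union _ _ hnd
    have hgU : ∀ u ∈ PySem.Set.union reach nw, pvGood graph vis0 u := by
      intro u hu
      rcases (PySem.Set.mem_union _ _ _).mp hu with h | h
      · exact hg u h
      · obtain ⟨⟨v, hv, hadj⟩, -, -⟩ := (hmem u).mp h
        exact HA u (pv_adj_sub graph v (hg v hv).2.2 u hadj)
    have HF' : ∀ u ∈ (bfsLevel graph frontier visited ret (ret + 1)).1, pvGood graph vis0 u :=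
      fun u hu => HA u (c5 u hu)
    have HR' : pvRel vis0 (bfsLevel graph frontier visited ret (ret + 1)).2.1
        (fun x => x ∈ PySem.Set.union reach nw) := by
      refine pvRel_iff _ _ _ _ c2 (fun x => ?_)
      rw [PySem.Set.mem_union]
      constructor
      · rintro (h | h)
        · exact Or.inl h
        · exact Or.inr ((hFnw x).mp h)
      · rintro (h | h)
        · exact Or.inl h
        · exact Or.inr ((hFnw x).mpr h)
    have HM' : ∀ x : Int,
        (x ∈ (bfsLevel graph frontier visited ret (ret + 1)).1 ∧
            x ∉ PySem.Set.union reach nw ∧ pvUnv vis0 x) ↔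
        ((∃ u ∈ PySem.Set.union reach nw, x ∈ pvAdj graph u) ∧ pvUnv vis0 x ∧
            x ∉ PySem.Set.union reach nw) := by
      intro x
      have hpostIff : (¬ (x ∈ reach ∨ pvFresh vis0 (fun x => x ∈ reach) frontier x)) ↔
          x ∉ PySem.Set.union reach nw := by
        constructor
        · intro h hc
          rcases (PySem.Set.mem_union _ _ _).mp hc with h1 | h1
          · exact h (Or.inl h1)
          · exact h (Or.inr ((hFnw x).mpr h1))
        · intro h hc
          rcases hc with h1 | h1
          · exact h ((PySem.Set.mem_union _ _ _).mpr (Or.inl h1))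
          · exact h ((PySem.Set.mem_union _ _ _).mpr (Or.inr ((hFnw x).mp h1)))
      constructor
      · rintro ⟨hxm, hxnu, hxv⟩
        obtain ⟨⟨v, hfv, hxadj⟩, -, -⟩ := (c6 x).mp ⟨hxm, hpostIff.mpr hxnu, hxv⟩
        exact ⟨⟨v, (PySem.Set.mem_union _ _ _).mpr (Or.inr ((hFnw v).mp hfv)), hxadj⟩, hxv, hxnu⟩
      · rintro ⟨⟨v, hv, hxadj⟩, hxv, hxnu⟩
        rcases (PySem.Set.mem_union _ _ _).mp hv with h1 | h1
        · exfalso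
          apply hxnu
          refine (PySem.Set.mem_union _ _ _).mpr (Or.inr ((hmem x).mpr ⟨⟨v, h1, hxadj⟩, hxv, ?_⟩))
          intro hc
          exact hxnu ((PySem.Set.mem_union _ _ _).mpr (Or.inl hc))
        · have := ((c6 x).mpr ⟨⟨v, (hFnw v).mpr h1, hxadj⟩, hxv, hpostIff.mpr hxnu⟩).1
          exact ⟨this, hxnu, hxv⟩
    have hrec := pv_outer_sim graph vis0 HA (PySem.Set.union reach nw)
      (bfsLevel graph frontier visited ret (ret + 1)).1
      (bfsLevel graph frontier visited ret (ret + 1)).2.1 (ret + 1) hndU hgU HF' HR' HM'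
    rw [bfsOuter, dif_neg hfe]
    simp only [c1, if_true, hret']
    rw [hRHS]
    exact hrec
termination_by ((PySem.List.dedup (graph.flatMap (fun p => p.2))).filter
    (fun x => !PySem.Set.contains reach x)).length
decreasing_by
  exact pv_sat_measure_lt graph reach nw (pv_satNew_sub graph vis0 reach nw hsat) hnil

-- ===== VERDICT (by name: the statement is the Claim_ definition above) =====
theorem bfs_spec : Claim_equal_bfs := by
  intro graph root visited _ hpre
  unfold Spec_bfs bfs bfs_alt
  cases hg : PySem.List.pyGet? visited root with
  | none =>
    exfalso
    rcases hpre with ⟨⟨h1, h2⟩, -⟩ | h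
    · obtain ⟨v, hv⟩ := pv_pyGet?_isSome' visited root h1 h2
      rw [hg] at hv
      cases hv
    · obtain ⟨⟨h0, hlt⟩, -⟩ := h root List.mem_cons_self
      obtain ⟨v, hv⟩ := pv_pyGet?_isSome visited root h0 hlt
      rw [hg] at hv
      cases hv
  | some v =>
    by_cases hv : v = 0
    · subst hv
      have hP2 : ∀ n ∈ root :: graph.flatMap (fun p => p.2),
          (0 ≤ n ∧ n < (visited.length : Int)) ∧ n ∈ graph.map (fun p => p.1) := by
        rcases hpre with ⟨-, h2⟩ | h
        · exfalso
          apply h2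
          unfold PySem.List.pyGetD
          rw [hg]
          rfl
        · exact h
      have HA : ∀ n ∈ graph.flatMap (fun p => p.2), pvGood graph visited n := by
        intro n hn
        obtain ⟨⟨h0, hlt⟩, hkey⟩ := hP2 n (List.mem_cons_of_mem _ hn)
        exact ⟨h0, hlt, pv_contains_ofList graph n hkey⟩
      have hGroot : pvGood graph visited root := by
        obtain ⟨⟨h0, hlt⟩, hkey⟩ := hP2 root List.mem_cons_self
        exact ⟨h0, hlt, pv_contains_ofList graph root hkey⟩
      have hUroot : pvUnv visited root := hg
      have hA : bfsLoopA graph [(root, 0)] visited 0 = bfsOuter graph [root] visited 0 0 := by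
        have := outer_eq graph visited [root] 0 0
        simpa using this
      obtain ⟨c1, c2, c3, c4, c5, c6⟩ := pv_level_char graph visited HA [root] visited 0 0
        (fun _ => False)
        (fun u hu => by rw [List.mem_singleton.mp hu]; exact hGroot)
        ⟨rfl, fun x hx => ⟨fun h => h.elim, fun _ => rfl⟩⟩
      have hfreshroot : pvFresh visited (fun _ => False) [root] root :=
        ⟨List.mem_singleton.mpr rfl, not_false, hUroot⟩
      have hret0 : (bfsLevel graph [root] visited 0 0).2.2.1 = 0 := by
        rw [c3 ⟨root, hfreshroot⟩, if_neg (lt_irrefl 0)]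
      have hsim : bfsOuter graph (bfsLevel graph [root] visited 0 0).1
          (bfsLevel graph [root] visited 0 0).2.1 0 (0 + 1) =
          satLoop graph visited [root] 0 := by
        refine pv_outer_sim graph visited HA ([root] : PySem.Set Int) _ _ 0
          (List.nodup_singleton root)
          (fun u hu => by rw [List.mem_singleton.mp hu]; exact hGroot)
          (fun u hu => HA u (c5 u hu)) ?_ ?_
        · refine pvRel_iff _ _ _ _ c2 (fun x => ?_)
          constructor
          · rintro (h | h)
            · exact h.elim
            · exact h.1
          · intro h
            rw [List.mem_singleton.mp h]
            exact Or.inr hfreshroot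
        · intro x
          constructor
          · rintro ⟨hxm, hxr, hxv⟩
            have hnpost : ¬ (False ∨ pvFresh visited (fun _ => False) [root] x) := by
              rintro (h | h)
              · exact h
              · exact hxr h.1
            obtain ⟨⟨u, hfu, hxadj⟩, -, -⟩ := (c6 x).mp ⟨hxm, hnpost, hxv⟩
            exact ⟨⟨u, hfu.1, hxadj⟩, hxv, hxr⟩
          · rintro ⟨⟨u, hu, hxadj⟩, hxv, hxr⟩
            have hu' : pvFresh visited (fun _ => False) [root] u := by
              rw [List.mem_singleton.mp hu]
              exact hfreshroot
            have hnpost : ¬ (False ∨ pvFresh visited (fun _ => False) [root] x) := by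
              rintro (h | h)
              · exact h
              · exact hxr h.1
            have := ((c6 x).mpr ⟨⟨u, hu', hxadj⟩, hxv, hnpost⟩).1
            exact ⟨this, hxr, hxv⟩
      rw [hA, bfsOuter, dif_neg (List.cons_ne_nil root [])]
      simp only [c1, if_true, hret0]
      simpa using hsim
    · show bfsLoopA graph [(root, 0)] visited 0 =
        if v = 0 then satLoop graph visited [root] 0 else 0
      rw [if_neg hv, bfsLoopA]
      split
      next heq => rfl
      next v' heq =>
        rw [hg] at heq
        injection heq with heq'
        subst heq'
        rw [dif_neg hv]
        simp [bfsLoopA]
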